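-- pv_equiv track=rewrite | github.com/Wizzerin/bot | app/services/schedule_utils.py | mask_to_cron
-- ===== SOURCE A (Python) =====
-- from typing import Optional, Tuple
--
-- _DOW_CRON  = ["mon", "tue", "wed", "thu", "fri", "sat", "sun"]
--
-- def all_days_mask() -> int:
--     """Все дни недели."""
--     return 0b1111111  # 127
--
-- def mask_to_cron(mask: Optional[int]) -> Optional[str]:
--     """
--     Переводит битовую маску дней в строку для APScheduler/CronTrigger(day_of_week=...).
--     """
--     if mask is None:
--         return None
--
--     mask = int(mask) & 0b1111111
--     if mask == 0 or mask == all_days_mask():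
--         return None
--
--     days = [name for i, name in enumerate(_DOW_CRON) if (mask & (1 << i))]
--     return ",".join(days) if days else None
-- ===== SOURCE B (Python) =====
-- from typing import Optional
--
-- _DOW_CRON = ["mon", "tue", "wed", "thu", "fri", "sat", "sun"]
--
--
-- def _build_table():
--     """Precompute the cron string for every masked value 0..127 once at import."""
--     table = []
--     for m in range(128):
--         parts = []
--         for i in range(7):
--             if (m >> i) & 1 == 1:
--                 parts.append(_DOW_CRON[i])
--         table.append(None if m == 0 or m == 127 else ",".join(parts))
--     return table
--
--
-- _TABLE = _build_table()
--
--
-- def mask_to_cron(mask: Optional[int]) -> Optional[str]: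
--     if mask is None:
--         return None
--     return _TABLE[int(mask) & 0b1111111]
-- ===== Notes on version B (the rewrite author's own statement) =====
-- stated objective: alternative
-- what changed: Replaces the per-call bit scan and comprehension with a 128-entry table precomputed once at import; each call is a single masked table lookup.
import Mathlib
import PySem

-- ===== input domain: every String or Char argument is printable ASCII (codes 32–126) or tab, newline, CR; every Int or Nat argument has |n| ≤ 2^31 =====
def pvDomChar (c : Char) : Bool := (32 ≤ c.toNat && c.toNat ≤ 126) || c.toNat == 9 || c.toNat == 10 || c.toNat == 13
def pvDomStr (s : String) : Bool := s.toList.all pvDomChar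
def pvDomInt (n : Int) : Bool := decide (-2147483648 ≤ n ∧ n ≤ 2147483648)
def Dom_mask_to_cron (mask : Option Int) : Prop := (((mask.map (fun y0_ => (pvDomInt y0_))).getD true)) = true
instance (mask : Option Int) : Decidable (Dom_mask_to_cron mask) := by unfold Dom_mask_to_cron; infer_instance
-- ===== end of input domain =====

-- B precomputes a 128-entry lookup table once instead of scanning the 7 bits on every call (objective: alternative).

-- ===== PORT A =====
def pvDowA : List String := ["mon", "tue", "wed", "thu", "fri", "sat", "sun"]

def all_days_mask : Int := 127

def mask_to_cron (mask : Option Int) : Option String :=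
  match mask with
  | none => none
  | some mask0 =>
    let mask1 : Int := PySem.Int.band mask0 127
    if mask1 = 0 ∨ mask1 = all_days_mask then none
    else
      let days : List String :=
        ((PySem.List.enumerate pvDowA 0).filter
          (fun p => PySem.Int.band mask1 ((1 : Int) <<< p.1.toNat) ≠ 0)).map (fun p => p.2)
      if days ≠ [] then some (PySem.Str.join "," days) else none

-- ===== PORT B =====
-- B uses the same module-level day-name constant _DOW_CRON

-- _build_table: outer loop over range(128), inner loop over range(7) collecting day names
def pvBuildTable : List (Option String) :=
  (PySem.List.pyRange 0 128 1).foldl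
    (fun table m =>
      let parts : List String :=
        (PySem.List.pyRange 0 7 1).foldl
          (fun parts i =>
            if PySem.Int.band (m >>> i.toNat) 1 = 1 then  -- i ∈ range(7), so i.toNat is exact
              parts ++ [PySem.List.pyGetD pvDowA i ""]
            else parts)
          []
      table ++ [if m = 0 ∨ m = 127 then none else some (PySem.Str.join "," parts)])
    []

def pvTable : List (Option String) := pvBuildTable

def mask_to_cron_alt (mask : Option Int) : Option String :=
  match mask with
  | none => none
  | some m => (PySem.List.pyGetD pvTable (PySem.Int.band m 127) none)

-- ===== PRECONDITION & SPEC =====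
def Spec_mask_to_cron (mask : Option Int) (out : Option String) : Prop := out = mask_to_cron_alt mask
instance (mask : Option Int) (out : Option String) : Decidable (Spec_mask_to_cron mask out) := by unfold Spec_mask_to_cron; infer_instance

-- ===== CLAIM (what is proved, stated in full; the proofs are below) =====
def Claim_equal_mask_to_cron : Prop := ∀ (mask : Option Int), Dom_mask_to_cron mask → Spec_mask_to_cron mask (mask_to_cron mask)

-- ===== LEMMAS AND PROOFS =====

theorem pv_band127 (m : Int) : PySem.Int.band m 127 = m % 128 := by
  unfold PySem.Int.band
  have h127 : (0:Int) ≤ 127 := by norm_num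
  simp only [if_pos h127]
  split_ifs with h
  · have h1 : m.toNat &&& Int.toNat 127 = m.toNat % 128 := Nat.and_two_pow_sub_one_eq_mod m.toNat 7
    rw [h1]; omega
  · have h1 : Int.toNat 127 &&& (-m - 1).toNat = (-m - 1).toNat % 128 := by
      rw [Nat.and_comm]; exact Nat.and_two_pow_sub_one_eq_mod _ 7
    rw [h1]; omega

theorem pv_band_reduce (m : Int) :
    PySem.Int.band (((m % 128).toNat : Int)) 127 = PySem.Int.band m 127 := by
  rw [pv_band127, pv_band127]
  have h0 : 0 ≤ m % 128 := Int.emod_nonneg m (by norm_num)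
  have h1 : m % 128 < 128 := Int.emod_lt_of_pos m (by norm_num)
  have hm : (((m % 128).toNat : Int)) = m % 128 := by omega
  rw [hm, Int.emod_emod_of_dvd m (dvd_refl 128)]

set_option maxRecDepth 100000 in
theorem pv_key : ∀ n : Fin 128,
    mask_to_cron (some ((n.val : Int))) = mask_to_cron_alt (some ((n.val : Int))) := by decide

theorem mask_to_cron_spec : Claim_equal_mask_to_cron := by
  intro mask _
  unfold Spec_mask_to_cron
  match mask with
  | none => rfl
  | some m =>
    have h0 : 0 ≤ m % 128 := Int.emod_nonneg m (by norm_num)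
    have h1 : m % 128 < 128 := Int.emod_lt_of_pos m (by norm_num)
    have hb : PySem.Int.band (((m % 128).toNat : Int)) 127 = PySem.Int.band m 127 :=
      pv_band_reduce m
    have hA : mask_to_cron (some m) = mask_to_cron (some (((m % 128).toNat : Int))) := by
      simp only [mask_to_cron, hb]
    have hB : mask_to_cron_alt (some m) = mask_to_cron_alt (some (((m % 128).toNat : Int))) := by
      simp only [mask_to_cron_alt, hb]
    rw [hA, hB]
    exact pv_key ⟨(m % 128).toNat, by omega⟩
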